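-- pv_equiv track=rewrite | github.com/jean-wang-huaijin/pseudoentanglement | trace_distance.py | second_trace
-- ===== SOURCE A (Python) =====
-- def second_trace(t,n):
--     d = 2**n
--     sum = 0
--
--     for m in range(1,t):
--         prod = 1
--         for i in range(1, m+1):
--             prod *= (2**(t-1) - 2**(i-1))
--         prod *= d**(t - m)
--
--         sum += prod
--
--     return sum
--
-- n = 10    # number of qubits
-- ===== SOURCE B (Python) =====
-- def second_trace(t, n):
--     d = 2 ** n
--     acc = 0
--     prod = 1
--     for m in range(1, t):
--         prod *= 2 ** (t - 1) - 2 ** (m - 1)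
--         acc = acc * d + prod
--     return acc * d
-- ===== Notes on version B (the rewrite author's own statement) =====
-- stated objective: faster
-- what changed: Replaced the quadratic double loop (inner product rebuilt from scratch for every m, plus a d**(t-m) power each step) by one pass that maintains the running partial product and folds the d-powers in Horner style (acc = acc*d + prod).
-- outside the precondition, e.g. on second_trace(1, -1): A returns 0, B returns 0.0; on second_trace(3, -1): A returns 3.75, B returns 3.75
import Mathlib
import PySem

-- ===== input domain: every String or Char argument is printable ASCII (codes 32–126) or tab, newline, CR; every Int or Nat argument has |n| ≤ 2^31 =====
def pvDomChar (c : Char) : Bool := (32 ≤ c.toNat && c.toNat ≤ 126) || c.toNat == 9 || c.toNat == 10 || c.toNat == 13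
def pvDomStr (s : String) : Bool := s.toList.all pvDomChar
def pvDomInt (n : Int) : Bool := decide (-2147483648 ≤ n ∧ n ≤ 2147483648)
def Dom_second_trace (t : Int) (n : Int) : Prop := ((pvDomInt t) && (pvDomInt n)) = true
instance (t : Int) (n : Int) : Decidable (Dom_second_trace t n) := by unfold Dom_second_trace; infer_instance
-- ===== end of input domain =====

-- B replaces A's O(t^2) double loop by one O(t) pass keeping the running partial
-- product and accumulating the d-powers in Horner style.

-- ===== PORT A =====
def second_trace (t : Int) (n : Int) : Int :=
  let d : Int := 2 ^ n.toNat
  (PySem.List.pyRange 1 t 1).foldl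
    (fun sum m =>
      let prod : Int := (PySem.List.pyRange 1 (m + 1) 1).foldl
        (fun prod i => prod * (2 ^ (t - 1).toNat - 2 ^ (i - 1).toNat)) 1
      let prod := prod * d ^ (t - m).toNat
      sum + prod) 0

-- ===== PORT B =====
def second_trace_alt (t : Int) (n : Int) : Int :=
  let d : Int := 2 ^ n.toNat
  let st := (PySem.List.pyRange 1 t 1).foldl
    (fun (st : Int × Int) m =>
      let prod := st.2 * (2 ^ (t - 1).toNat - 2 ^ (m - 1).toNat)
      (st.1 * d + prod, prod)) (0, 1)
  st.1 * d

-- ===== PRECONDITION & SPEC =====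
-- Pre_ excludes negative n, where Python's 2**n is a float: for t ≥ 2 A returns a
-- float (not an Int), and for t ≤ 1 A returns int 0 only because the loop never
-- runs while B's acc*d is float 0.0 there.
def Pre_second_trace (_t : Int) (n : Int) : Prop := 0 ≤ n
instance (t : Int) (n : Int) : Decidable (Pre_second_trace t n) := by unfold Pre_second_trace; infer_instance
def pvWitness_second_trace : Int × Int := (4, 2)

def Spec_second_trace (t : Int) (n : Int) (out : Int) : Prop := out = second_trace_alt t n
instance (t : Int) (n : Int) (out : Int) : Decidable (Spec_second_trace t n out) := by unfold Spec_second_trace; infer_instance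

-- ===== CLAIM (what is proved, stated in full; the proofs are below) =====
def Claim_equal_second_trace : Prop := ∀ (t : Int) (n : Int), Dom_second_trace t n → Pre_second_trace t n → Spec_second_trace t n (second_trace t n)

-- ===== LEMMAS AND PROOFS =====

-- the common multiplicative factor c i = 2^(t-1) - 2^(i-1)
def pvFac (t i : Int) : Int := 2 ^ (t - 1).toNat - 2 ^ (i - 1).toNat

-- A's outer-loop body and B's loop body, abstracted for the invariant
def pvFA (t d : Int) (sum m : Int) : Int :=
  sum + ((PySem.List.pyRange 1 (m + 1) 1).foldl (fun prod i => prod * pvFac t i) 1) * d ^ (t - m).toNat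

def pvFB (t d : Int) (st : Int × Int) (m : Int) : Int × Int :=
  (st.1 * d + st.2 * pvFac t m, st.2 * pvFac t m)

-- Invariant over the prefix [1, …, j]:
--   A's partial sum = B's accumulator * d^(t-j), and B's prod = Π_{i=1}^{j} c i.
theorem pv_inv (t d : Int) : ∀ (j : Nat), (j : Int) ≤ t - 1 →
    (PySem.List.pyRange 1 (1 + (j : Int)) 1).foldl (pvFA t d) 0
      = ((PySem.List.pyRange 1 (1 + (j : Int)) 1).foldl (pvFB t d) (0, 1)).1 * d ^ (t - (j : Int)).toNat
    ∧ ((PySem.List.pyRange 1 (1 + (j : Int)) 1).foldl (pvFB t d) (0, 1)).2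
      = (PySem.List.pyRange 1 (1 + (j : Int)) 1).foldl (fun p i => p * pvFac t i) 1 := by
  intro j
  induction j with
  | zero =>
    intro _
    simp [PySem.List.pyRange_one_eq_nil (by omega : (1 : Int) ≤ 1)]
  | succ j ih =>
    intro hj
    have hj' : (j : Int) ≤ t - 1 := by omega
    obtain ⟨ih1, ih2⟩ := ih hj'
    have hsplit : PySem.List.pyRange 1 (1 + ((j : Nat) + 1 : Int)) 1
        = PySem.List.pyRange 1 (1 + (j : Int)) 1 ++ [1 + (j : Int)] := by
      have : (1 + ((j : Nat) + 1 : Int)) = (1 + (j : Int)) + 1 := by ring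
      rw [this, PySem.List.pyRange_one_succ_right (by omega : (1 : Int) ≤ 1 + (j : Int))]
    have hcast : ((j + 1 : Nat) : Int) = (j : Int) + 1 := by push_cast; ring
    rw [hcast] at *
    rw [hsplit, List.foldl_append, List.foldl_append, List.foldl_append]
    simp only [List.foldl_cons, List.foldl_nil]
    constructor
    · -- sum equation
      show pvFA t d _ (1 + (j : Int)) = (pvFB t d _ (1 + (j : Int))).1 * d ^ (t - ((j : Int) + 1)).toNat
      simp only [pvFA, pvFB] at ih1 ih2 ⊢
      have hinner : (PySem.List.pyRange 1 (1 + (j : Int) + 1) 1).foldl (fun p i => p * pvFac t i) 1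
          = ((PySem.List.pyRange 1 (1 + (j : Int)) 1).foldl (fun p i => p * pvFac t i) 1) * pvFac t (1 + (j : Int)) := by
        rw [PySem.List.pyRange_one_succ_right (by omega : (1 : Int) ≤ 1 + (j : Int)), List.foldl_append]
        simp
      have hexp : (t - (j : Int)).toNat = (t - ((j : Int) + 1)).toNat + 1 := by omega
      have harg : t - (1 + (j : Int)) = t - ((j : Int) + 1) := by ring
      rw [hinner, harg, ih1, ih2, hexp, pow_succ]
      ring
    · -- prod equation
      show (pvFB t d _ (1 + (j : Int))).2
          = ((PySem.List.pyRange 1 (1 + (j : Int)) 1).foldl (fun p i => p * pvFac t i) 1) * pvFac t (1 + (j : Int))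
      simp only [pvFB] at ih2 ⊢
      rw [ih2]

theorem pv_foldA (t n : Int) :
    second_trace t n = (PySem.List.pyRange 1 t 1).foldl (pvFA t (2 ^ n.toNat)) 0 := by
  unfold second_trace pvFA pvFac
  rfl

theorem pv_foldB (t n : Int) :
    second_trace_alt t n = ((PySem.List.pyRange 1 t 1).foldl (pvFB t (2 ^ n.toNat)) (0, 1)).1 * 2 ^ n.toNat := by
  unfold second_trace_alt pvFB pvFac
  rfl

-- ===== VERDICT (by name: the statement is the Claim_ definition above) =====
theorem second_trace_spec : Claim_equal_second_trace := by
  intro t n _ _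
  unfold Spec_second_trace
  rw [pv_foldA, pv_foldB]
  by_cases ht : t ≤ 1
  · rw [PySem.List.pyRange_one_eq_nil ht]
    simp
  · -- t ≥ 2: apply the invariant with j = (t-1).toNat, so the prefix is the whole range
    rw [not_le] at ht
    set d : Int := 2 ^ n.toNat with hd
    have hjt : (( (t - 1).toNat : Nat) : Int) = t - 1 := by omega
    have h := pv_inv t d (t - 1).toNat (by rw [hjt])
    rw [hjt] at h
    have hrange : (1 : Int) + (t - 1) = t := by ring
    rw [hrange] at h
    have hexp : (t - (t - 1)).toNat = 1 := by omega
    rw [hexp, pow_one] at h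
    exact h.1
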